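-- pv_equiv track=rewrite | github.com/xiaoyingpu/SIParCS_NCAR | tsne/impl_tsne.py | color_index
-- ===== SOURCE A (Python) =====
-- def get_model(s):
--     return s.split("_", 1)[0].split("-",1)[0]
--
-- def color_index(f_list):
--     y = []
--     d = {}
--     i = 0
--     for f in f_list:
--         m = get_model(f)
--         if m not in d:
--             d[m] = i
--             i += 1
--         y.append(d[m])
--     return y, d
-- ===== SOURCE B (Python) =====
-- def get_model(s):
--     return s.split("_", 1)[0].split("-", 1)[0]
--
-- def color_index(f_list):
--     models = list(dict.fromkeys(get_model(f) for f in f_list))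
--     d = {m: i for i, m in enumerate(models)}
--     y = [d[get_model(f)] for f in f_list]
--     return y, d
-- ===== Notes on version B (the rewrite author's own statement) =====
-- stated objective: alternative
-- what changed: Replaces the single interleaved loop that assigns indices while appending with a three-stage pipeline: dedup the models in first-appearance order, build the index table by enumeration, then map the list through the table.
import Mathlib
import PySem

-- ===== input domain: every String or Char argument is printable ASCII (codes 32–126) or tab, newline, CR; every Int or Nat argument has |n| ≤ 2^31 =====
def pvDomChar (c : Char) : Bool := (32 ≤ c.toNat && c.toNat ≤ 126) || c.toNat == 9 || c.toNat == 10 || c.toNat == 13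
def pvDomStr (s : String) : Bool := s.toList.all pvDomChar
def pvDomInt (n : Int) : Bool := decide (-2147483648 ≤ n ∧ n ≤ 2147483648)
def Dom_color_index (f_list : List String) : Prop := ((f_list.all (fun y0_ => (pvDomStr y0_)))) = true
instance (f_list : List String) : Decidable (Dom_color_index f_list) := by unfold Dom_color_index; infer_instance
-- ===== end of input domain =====

-- B re-decomposes A's single interleaved loop into dedup-then-enumerate-then-map; same result, same cost (objective: alternative).

-- ===== PORT A =====
-- get_model(s) = s.split("_", 1)[0].split("-", 1)[0]; Python split with a nonempty
-- separator always returns a nonempty list, so the getD/headD defaults are unreachable.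
def get_model (s : String) : String :=
  let a := ((PySem.Str.splitMax? s "_" 1).getD []).headD ""
  ((PySem.Str.splitMax? a "-" 1).getD []).headD ""

-- d[m] after the conditional insert always finds m, so the getD default 0 is unreachable.
def color_index (f_list : List String) : List Int × (List (String × Int)) :=
  let st := f_list.foldl
    (fun (acc : List Int × PySem.Dict String Int × Int) f =>
      let y := acc.1
      let d := acc.2.1
      let i := acc.2.2
      let m := get_model f
      let di : PySem.Dict String Int × Int :=
        if d.contains m then (d, i) else (d.insert m i, i + 1)
      (y ++ [di.1.getD m 0], di.1, di.2))
    ([], PySem.Dict.empty, 0)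
  (st.1, st.2.1.items)

-- ===== PORT B =====
-- models = list(dict.fromkeys(...)); d = {m: i for i, m in enumerate(models)}; y = [d[get_model(f)] ...]
def color_index_alt (f_list : List String) : List Int × (List (String × Int)) :=
  let models := PySem.List.dedup (f_list.map get_model)
  let d := (PySem.List.enumerate models).foldl
    (fun (d : PySem.Dict String Int) p => d.insert p.2 p.1) PySem.Dict.empty
  let y := f_list.map (fun f => d.getD (get_model f) 0)
  (y, d.items)

-- ===== PRECONDITION & SPEC =====
def Spec_color_index (f_list : List String) (out : List Int × (List (String × Int))) : Prop := out = color_index_alt f_list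
instance (f_list : List String) (out : List Int × (List (String × Int))) : Decidable (Spec_color_index f_list out) := by unfold Spec_color_index; infer_instance

-- ===== CLAIM (what is proved, stated in full; the proofs are below) =====
def Claim_equal_color_index : Prop := ∀ (f_list : List String), Dom_color_index f_list → Spec_color_index f_list (color_index f_list)

-- ===== LEMMAS AND PROOFS =====

-- the table dict associated with a nodup key list ks: key ks[j] ↦ j
def pvTab (ks : List String) : PySem.Dict String Int :=
  PySem.Dict.mk ((PySem.List.enumerate ks).map (fun p => (p.2, p.1)))

lemma pvTab_keys (ks : List String) : (pvTab ks).keys = ks := by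
  simp only [pvTab, PySem.Dict.keys, List.map_map]
  simp [Function.comp_def, PySem.List.map_snd_enumerate]

lemma pvTab_insert (ks : List String) (m : String) (h : m ∉ ks) :
    (pvTab ks).insert m (ks.length : Int) = pvTab (ks ++ [m]) := by
  apply PySem.Dict.ext
  rw [PySem.Dict.items_insert_of_not_contains]
  · simp [pvTab, PySem.List.enumerate_append, PySem.List.enumerate_cons]
  · rw [PySem.Dict.contains_eq_decide_mem_keys, pvTab_keys]
    simpa using h

lemma pvGet?_mk_append_left (l1 l2 : List (String × Int)) (k : String)
    (h : k ∈ l1.map Prod.fst) :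
    (PySem.Dict.mk (l1 ++ l2)).get? k = (PySem.Dict.mk l1).get? k := by
  induction l1 with
  | nil => simp at h
  | cons p l1 ih =>
    obtain ⟨a, v⟩ := p
    rw [List.cons_append, PySem.Dict.get?_mk_cons, PySem.Dict.get?_mk_cons]
    by_cases hak : a = k
    · simp [hak]
    · simp only [beq_iff_eq, hak, if_false]
      apply ih
      simp only [List.map_cons, List.mem_cons] at h
      rcases h with h | h
      · exact absurd h.symm hak
      · exact h

lemma pvTab_getD_append (ks ex : List String) (m : String) (h : m ∈ ks) :
    (pvTab (ks ++ ex)).getD m 0 = (pvTab ks).getD m 0 := by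
  rw [PySem.Dict.getD_eq_get?_getD, PySem.Dict.getD_eq_get?_getD]
  congr 1
  have : pvTab (ks ++ ex) = PySem.Dict.mk
      (((PySem.List.enumerate ks).map (fun p => (p.2, p.1))) ++
       ((PySem.List.enumerate ex ks.length).map (fun p => (p.2, p.1)))) := by
    simp [pvTab, PySem.List.enumerate_append]
  rw [this]
  apply pvGet?_mk_append_left
  simpa [Function.comp_def, PySem.List.map_snd_enumerate] using h

lemma pvUpdate_append (l : List String) : ∀ ks : List String,
    ∃ ex, PySem.Set.update ks l = ks ++ ex := by
  induction l with
  | nil => intro ks; exact ⟨[], by simp [PySem.Set.update]⟩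
  | cons x l ih =>
    intro ks
    by_cases hx : x ∈ ks
    · obtain ⟨ex, hex⟩ := ih ks
      exact ⟨ex, by simpa [PySem.Set.update, PySem.Set.add, hx] using hex⟩
    · obtain ⟨ex, hex⟩ := ih (ks ++ [x])
      exact ⟨x :: ex, by simpa [PySem.Set.update, PySem.Set.add, hx] using hex⟩

lemma pvTab_getD_update (ks : List String) (l : List String) (m : String) (h : m ∈ ks) :
    (pvTab (PySem.Set.update ks l)).getD m 0 = (pvTab ks).getD m 0 := by
  obtain ⟨ex, hex⟩ := pvUpdate_append l ks
  rw [hex, pvTab_getD_append ks ex m h]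

-- A's loop from state (y, pvTab ks, |ks|) appends lookups in the FINAL table and extends ks by the new models.
lemma pvFoldA (fs : List String) : ∀ (y : List Int) (ks : List String), ks.Nodup →
    fs.foldl
      (fun (acc : List Int × PySem.Dict String Int × Int) f =>
        let y := acc.1
        let d := acc.2.1
        let i := acc.2.2
        let m := get_model f
        let di : PySem.Dict String Int × Int :=
          if d.contains m then (d, i) else (d.insert m i, i + 1)
        (y ++ [di.1.getD m 0], di.1, di.2))
      (y, pvTab ks, (ks.length : Int)) =
    (y ++ fs.map (fun f => (pvTab (PySem.Set.update ks (fs.map get_model))).getD (get_model f) 0),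
     pvTab (PySem.Set.update ks (fs.map get_model)),
     ((PySem.Set.update ks (fs.map get_model)).length : Int)) := by
  induction fs with
  | nil => intro y ks _; simp [PySem.Set.update]
  | cons f fs ih =>
    intro y ks hnd
    have hcont : (pvTab ks).contains (get_model f) = decide (get_model f ∈ ks) := by
      rw [PySem.Dict.contains_eq_decide_mem_keys, pvTab_keys]
    by_cases hm : get_model f ∈ ks
    · have hupd : PySem.Set.update ks (List.map get_model (f :: fs)) =
          PySem.Set.update ks (fs.map get_model) := by
        simp [PySem.Set.update, PySem.Set.add, hm]
      rw [List.foldl_cons]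
      simp only [hcont, hm, decide_true, if_true]
      rw [ih (y ++ [(pvTab ks).getD (get_model f) 0]) ks hnd, hupd]
      simp [pvTab_getD_update ks (fs.map get_model) (get_model f) hm]
    · have hupd : PySem.Set.update ks (List.map get_model (f :: fs)) =
          PySem.Set.update (ks ++ [get_model f]) (fs.map get_model) := by
        simp [PySem.Set.update, PySem.Set.add, hm]
      have hnd' : (ks ++ [get_model f]).Nodup := by
        simp [List.nodup_append, hnd]
        exact fun a ha heq => hm (heq ▸ ha)
      rw [List.foldl_cons]
      simp only [hcont, hm, decide_false, Bool.false_eq_true, if_false]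
      rw [pvTab_insert ks (get_model f) hm]
      have hlen : (ks.length : Int) + 1 = ((ks ++ [get_model f]).length : Int) := by
        simp
      rw [hlen, ih (y ++ [(pvTab (ks ++ [get_model f])).getD (get_model f) 0]) _ hnd', hupd]
      have hmem : get_model f ∈ ks ++ [get_model f] := by simp
      simp [pvTab_getD_update _ (fs.map get_model) _ hmem]

lemma pvDictB (models : List String) (hnd : models.Nodup) :
    (PySem.List.enumerate models).foldl
      (fun (d : PySem.Dict String Int) p => d.insert p.2 p.1) PySem.Dict.empty = pvTab models := by
  apply PySem.Dict.ext
  have := PySem.Dict.items_foldl_insert_fresh (l := PySem.List.enumerate models)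
    (k := fun p => p.2) (v := fun p => p.1) (d := PySem.Dict.empty)
    (by intro a _; simp) (by simpa [PySem.List.map_snd_enumerate] using hnd)
  simpa [pvTab] using this

lemma pvEmpty_eq_tab_nil : (PySem.Dict.empty : PySem.Dict String Int) = pvTab [] := by
  rfl

lemma pvFoldA0 (fs : List String) :
    fs.foldl
      (fun (acc : List Int × PySem.Dict String Int × Int) f =>
        let y := acc.1
        let d := acc.2.1
        let i := acc.2.2
        let m := get_model f
        let di : PySem.Dict String Int × Int :=
          if d.contains m then (d, i) else (d.insert m i, i + 1)
        (y ++ [di.1.getD m 0], di.1, di.2))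
      ([], PySem.Dict.empty, 0) =
    (fs.map (fun f => (pvTab (PySem.List.dedup (fs.map get_model))).getD (get_model f) 0),
     pvTab (PySem.List.dedup (fs.map get_model)),
     ((PySem.List.dedup (fs.map get_model)).length : Int)) := by
  have h := pvFoldA fs [] [] List.nodup_nil
  have hupd : PySem.Set.update ([] : List String) (fs.map get_model) =
      PySem.List.dedup (fs.map get_model) := by
    simp [PySem.Set.update, PySem.List.dedup_eq_ofList, PySem.Set.ofList_eq_foldl]
  rw [hupd] at h
  simpa [pvEmpty_eq_tab_nil] using h

-- ===== VERDICT (by name: the statement is the Claim_ definition above) =====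
theorem color_index_spec : Claim_equal_color_index := by
  intro f_list _
  unfold Spec_color_index
  show color_index f_list = color_index_alt f_list
  simp only [color_index, color_index_alt]
  rw [pvFoldA0, pvDictB _ (PySem.List.nodup_dedup _)]
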